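-- pv_equiv track=rewrite | github.com/sturnerin/Katerina | HW-7/HW-7.py | listwo
-- ===== SOURCE A (Python) =====
-- def listwo(words):
--     num = 0
--     length = 0
--     for word in words:
--         if word.endswith('ous'):
--             length += len(word)
--             num += 1
--     return length, num
-- ===== SOURCE B (Python) =====
-- def listwo(words):
--     n = len(words)
--     if n == 0:
--         return 0, 0
--     if n == 1:
--         w = words[0]
--         if w[-3:] == 'ous':
--             return len(w), 1
--         return 0, 0
--     mid = n // 2
--     l1, c1 = listwo(words[:mid])
--     l2, c2 = listwo(words[mid:])
--     return l1 + l2, c1 + c2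
-- ===== Notes on version B (the rewrite author's own statement) =====
-- stated objective: alternative
-- what changed: Replaces A's single forward pass with two running accumulators by a divide-and-conquer recursion: split the list at the midpoint, solve each half recursively, and add the two (length-sum, count) pairs; the membership test uses the slice comparison w[-3:] == 'ous' instead of str.endswith.
import Mathlib
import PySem

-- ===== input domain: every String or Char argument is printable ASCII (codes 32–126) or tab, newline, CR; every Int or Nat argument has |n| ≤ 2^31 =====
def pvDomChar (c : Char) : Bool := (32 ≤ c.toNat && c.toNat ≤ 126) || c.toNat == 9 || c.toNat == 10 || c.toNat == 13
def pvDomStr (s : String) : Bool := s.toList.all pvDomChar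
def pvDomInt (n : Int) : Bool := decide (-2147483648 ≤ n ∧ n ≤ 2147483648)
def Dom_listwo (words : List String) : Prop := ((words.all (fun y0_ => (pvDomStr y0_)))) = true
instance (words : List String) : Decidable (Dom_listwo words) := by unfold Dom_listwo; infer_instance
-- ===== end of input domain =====

-- B is a divide-and-conquer recursion (split at the midpoint, add the two pairs) with a
-- slice-comparison membership test, instead of A's single forward pass with two accumulators.

-- ===== PORT A =====
-- A: one pass, two running accumulators (length, num)
def listwo (words : List String) : Int × Int :=
  words.foldl (fun (st : Int × Int) word =>
    if PySem.Str.endswith word "ous" then (st.1 + (PySem.Str.len word : Int), st.2 + 1) else st)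
    (0, 0)

-- ===== PORT B =====
-- B: divide and conquer; base case tests w[-3:] == 'ous'; halves are combined by pair addition
def listwo_alt (words : List String) : Int × Int :=
  if words.length = 0 then (0, 0)
  else if words.length = 1 then
    let w := words.headI          -- words[0]; the list has exactly one element here
    if PySem.Str.slice w (some (-3)) none = "ous" then ((PySem.Str.len w : Int), 1) else (0, 0)
  else
    let mid := PySem.Int.floordiv (words.length : Int) 2
    let p1 := listwo_alt (PySem.List.slice words none (some mid))
    let p2 := listwo_alt (PySem.List.slice words (some mid) none)
    (p1.1 + p2.1, p1.2 + p2.2)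
termination_by words.length
decreasing_by
  · have h2 : 2 ≤ words.length := by omega
    rw [PySem.Int.floordiv_eq_ediv_of_pos (by norm_num)]
    have : ((words.length : Int)) / 2 = ((words.length / 2 : Nat) : Int) := by push_cast; ring
    rw [this, PySem.List.slice_to_natCast]
    simp only [List.length_take]
    omega
  · have h2 : 2 ≤ words.length := by omega
    rw [PySem.Int.floordiv_eq_ediv_of_pos (by norm_num)]
    have : ((words.length : Int)) / 2 = ((words.length / 2 : Nat) : Int) := by push_cast; ring
    rw [this, PySem.List.slice_from_natCast]
    simp only [List.length_drop]
    omega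

-- ===== PRECONDITION & SPEC =====
def Spec_listwo (words : List String) (out : Int × Int) : Prop := out = listwo_alt words
instance (words : List String) (out : Int × Int) : Decidable (Spec_listwo words out) := by unfold Spec_listwo; infer_instance

-- ===== CLAIM =====
def Claim_equal_listwo : Prop := ∀ (words : List String), Dom_listwo words → Spec_listwo words (listwo words)

-- ===== LEMMAS AND PROOFS =====

-- the common specification both ports compute
def pvSpecPair (ws : List String) : Int × Int :=
  (((ws.filter (fun w => PySem.Str.endswith w "ous")).map (fun w => (PySem.Str.len w : Int))).sum,
   ((ws.countP (fun w => PySem.Str.endswith w "ous") : Nat) : Int))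

theorem pvSlice_eq_endswith (w : String) :
    (PySem.Str.slice w (some (-3)) none = "ous") ↔ ['o','u','s'] <:+ w.toList := by
  have hl : (PySem.Str.slice w (some (-3)) none).toList = w.toList.drop (w.length - 3) := by
    rw [PySem.Str.toList_slice, PySem.Chars.slice_eq_listSlice,
        PySem.List.slice_from_neg_ofNat w.toList 3 (by norm_num)]
    simp
  constructor
  · intro h
    have hd : w.toList.drop (w.length - 3) = ['o','u','s'] := by rw [← hl, h]; rfl
    exact hd ▸ List.drop_suffix _ _
  · rintro ⟨t, ht⟩
    have hlen : w.length + 0 = t.length + 3 := by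
      have := congrArg List.length ht
      simpa using this.symm
    have hd : w.toList.drop (w.length - 3) = ['o','u','s'] := by
      have h3 : w.length - 3 = t.length := by omega
      rw [← ht, h3]
      exact List.drop_left
    have : (PySem.Str.slice w (some (-3)) none).toList = "ous".toList := by rw [hl, hd]; rfl
    exact String.toList_inj.mp this

theorem pvSpecPair_append (xs ys : List String) :
    pvSpecPair (xs ++ ys) = ((pvSpecPair xs).1 + (pvSpecPair ys).1, (pvSpecPair xs).2 + (pvSpecPair ys).2) := by
  simp [pvSpecPair, List.filter_append, List.countP_append]

theorem pvAlt_eq_spec (ws : List String) : listwo_alt ws = pvSpecPair ws := by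
  induction ws using listwo_alt.induct with
  | case1 ws h0 =>
    rw [listwo_alt, if_pos h0, List.length_eq_zero_iff.mp h0]
    simp [pvSpecPair]
  | case2 ws h0 h1 wv h =>
    rw [listwo_alt, if_neg h0, if_pos h1]
    obtain ⟨w, rfl⟩ := List.length_eq_one_iff.mp h1
    have h' : PySem.Str.slice w (some (-3)) none = "ous" := h
    show (if PySem.Str.slice ([w].headI) (some (-3)) none = "ous" then ((PySem.Str.len ([w].headI) : Int), (1:Int)) else (0, 0)) = pvSpecPair [w]
    simp only [List.headI]
    rw [if_pos h']
    have he : ['o','u','s'] <:+ w.toList := (pvSlice_eq_endswith w).mp h' 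
    simp [pvSpecPair, PySem.Chars.endswith_iff, he]
  | case3 ws h0 h1 wv h =>
    rw [listwo_alt, if_neg h0, if_pos h1]
    obtain ⟨w, rfl⟩ := List.length_eq_one_iff.mp h1
    have h' : ¬ (PySem.Str.slice w (some (-3)) none = "ous") := h
    show (if PySem.Str.slice ([w].headI) (some (-3)) none = "ous" then ((PySem.Str.len ([w].headI) : Int), (1:Int)) else (0, 0)) = pvSpecPair [w]
    simp only [List.headI]
    rw [if_neg h']
    have he : ¬ (['o','u','s'] <:+ w.toList) := fun hc => h' ((pvSlice_eq_endswith w).mpr hc)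
    simp [pvSpecPair, PySem.Chars.endswith_iff, he]
  | case4 ws h0 h1 midv ih1 ih2 =>
    rw [listwo_alt, if_neg h0, if_neg h1]
    simp only
    rw [ih1, ih2]
    have hmid : PySem.Int.floordiv (ws.length : Int) 2 = ((ws.length / 2 : Nat) : Int) := by
      rw [PySem.Int.floordiv_eq_ediv_of_pos (by norm_num)]
      push_cast; ring
    have hm2 : midv = ((ws.length / 2 : Nat) : Int) := hmid
    rw [hm2, PySem.List.slice_to_natCast, PySem.List.slice_from_natCast]
    rw [← pvSpecPair_append, List.take_append_drop]

theorem pvA_foldl (ws : List String) (l n : Int) :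
    ws.foldl (fun (st : Int × Int) word =>
      if PySem.Str.endswith word "ous" then (st.1 + (PySem.Str.len word : Int), st.2 + 1) else st)
      (l, n)
    = (l + (pvSpecPair ws).1, n + (pvSpecPair ws).2) := by
  induction ws generalizing l n with
  | nil => simp [pvSpecPair]
  | cons w t ih =>
    simp only [List.foldl_cons]
    by_cases h : PySem.Str.endswith w "ous" = true
    · rw [if_pos h, ih]
      have h' : ['o','u','s'] <:+ w.toList := by
        simpa [PySem.Str.endswith_eq, PySem.Chars.endswith_iff] using h
      simp only [pvSpecPair, List.filter_cons, List.countP_cons]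
      simp [PySem.Chars.endswith_iff, h']
      constructor <;> ring
    · rw [if_neg h, ih]
      have h' : ¬ (['o','u','s'] <:+ w.toList) := by
        simpa [PySem.Str.endswith_eq, PySem.Chars.endswith_iff] using h
      simp only [pvSpecPair, List.filter_cons, List.countP_cons]
      simp [PySem.Chars.endswith_iff, h']

-- ===== VERDICT =====
theorem listwo_spec : Claim_equal_listwo := by
  intro words _
  unfold Spec_listwo listwo
  rw [pvA_foldl, pvAlt_eq_spec]
  simp
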